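-- pv_equiv track=rewrite | github.com/firemachineFTW/a-genetico | app.py | adaptacion_3sat
-- ===== SOURCE A (Python) =====
-- def adaptacion_3sat(gen, solucion):
--     n = 3
--     cont = 0
--     clausula_ok = True
--     for i in range(len(gen)):
--         n = n - 1
--         if gen[i] != solucion[i]:
--             clausula_ok = False
--             if n == 0:
--                 if clausula_ok:
--                     cont = cont + 1
--                 n = 3
--                 clausula_ok = True
--         if n == 0:
--             if clausula_ok:
--                 cont = cont + 1
--             n = 3
--             clausula_ok = True
--     return cont
-- ===== SOURCE B (Python) =====
-- def adaptacion_3sat(gen, solucion):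
--     m = [gen[i] == solucion[i] for i in range(len(gen))]
--     return sum(1 for j in range(len(gen) // 3) if m[3*j] and m[3*j+1] and m[3*j+2])
-- ===== Notes on version B (the rewrite author's own statement) =====
-- stated objective: simpler
-- what changed: Replaced A's single stateful scan with countdown n and clausula_ok flag by a two-phase decomposition: build a per-position match table in one pass, then count complete triples whose three entries all match.
import Mathlib
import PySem

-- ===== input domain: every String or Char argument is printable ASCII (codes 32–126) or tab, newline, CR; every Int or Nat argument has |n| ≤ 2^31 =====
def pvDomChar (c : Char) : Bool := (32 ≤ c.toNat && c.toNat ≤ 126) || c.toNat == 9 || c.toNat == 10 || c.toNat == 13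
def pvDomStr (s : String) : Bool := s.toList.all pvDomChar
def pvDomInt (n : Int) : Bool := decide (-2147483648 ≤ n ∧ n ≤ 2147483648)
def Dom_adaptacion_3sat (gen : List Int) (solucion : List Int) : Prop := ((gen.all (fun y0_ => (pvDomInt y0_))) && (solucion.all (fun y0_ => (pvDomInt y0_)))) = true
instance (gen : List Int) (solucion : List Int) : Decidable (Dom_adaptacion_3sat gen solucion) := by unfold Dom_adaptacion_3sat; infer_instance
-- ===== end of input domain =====

-- B replaces A's stateful countdown scan by a match-table pass followed by a count over complete triples (objective: simpler).

-- ===== PORT A =====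
-- literal port of A's single scan with state (n, cont, clausula_ok); gen[i]/solucion[i] via pyGetD,
-- exact under Pre_ (indices in range)
def adaptacion_3sat (gen : List Int) (solucion : List Int) : Int :=
  (((PySem.List.pyRange 0 (gen.length : Int) 1).foldl
    (fun (st : Int × Int × Bool) (i : Int) =>
      let n := st.1 - 1
      let cont := st.2.1
      let ok := st.2.2
      let st1 : Int × Int × Bool :=
        if PySem.List.pyGetD gen i 0 ≠ PySem.List.pyGetD solucion i 0 then
          -- clausula_ok := False, then the inner 'if n == 0' block
          if n = 0 then (3, (if false then cont + 1 else cont), true)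
          else (n, cont, false)
        else (n, cont, ok)
      if st1.1 = 0 then (3, (if st1.2.2 then st1.2.1 + 1 else st1.2.1), true)
      else st1)
    ((3 : Int), (0 : Int), true)) : Int × Int × Bool).2.1

-- ===== PORT B =====
-- literal port of Source B: match table m, then count complete triples with all three entries true
def adaptacion_3sat_alt (gen : List Int) (solucion : List Int) : Int :=
  let m : List Bool := (PySem.List.pyRange 0 (gen.length : Int) 1).map
    (fun i => PySem.List.pyGetD gen i 0 == PySem.List.pyGetD solucion i 0)
  (PySem.List.pyRange 0 (PySem.Int.floordiv (gen.length : Int) 3) 1).foldl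
    (fun (cont : Int) (j : Int) =>
      if PySem.List.pyGetD m (3 * j) false && PySem.List.pyGetD m (3 * j + 1) false
          && PySem.List.pyGetD m (3 * j + 2) false
      then cont + 1 else cont) 0

-- ===== PRECONDITION & SPEC =====
-- Pre_ excludes exactly the inputs where Python A raises IndexError: solucion shorter than gen
-- (both A and B index solucion[i] for every i < len(gen)).
def Pre_adaptacion_3sat (gen : List Int) (solucion : List Int) : Prop :=
  gen.length ≤ solucion.length
instance (gen : List Int) (solucion : List Int) : Decidable (Pre_adaptacion_3sat gen solucion) := by
  unfold Pre_adaptacion_3sat; infer_instance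
def pvWitness_adaptacion_3sat : List Int × List Int := ([1, 2, 3, 4, 5, 6], [1, 2, 3, 4, 0, 6])

def Spec_adaptacion_3sat (gen : List Int) (solucion : List Int) (out : Int) : Prop := out = adaptacion_3sat_alt gen solucion
instance (gen : List Int) (solucion : List Int) (out : Int) : Decidable (Spec_adaptacion_3sat gen solucion out) := by unfold Spec_adaptacion_3sat; infer_instance

-- ===== CLAIM (what is proved, stated in full; the proofs are below) =====
def Claim_equal_adaptacion_3sat : Prop := ∀ (gen : List Int) (solucion : List Int), Dom_adaptacion_3sat gen solucion → Pre_adaptacion_3sat gen solucion → Spec_adaptacion_3sat gen solucion (adaptacion_3sat gen solucion)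

-- ===== LEMMAS AND PROOFS =====

-- the per-position match table, as a pure function of the two lists
def pvMatch (gen solucion : List Int) : List Bool :=
  (List.range gen.length).map (fun k => gen.getD k 0 == solucion.getD k 0)

-- A's loop body, as a function of the match bit only
def pvStepA (st : Int × Int × Bool) (b : Bool) : Int × Int × Bool :=
  let n := st.1 - 1
  let st1 : Int × Int × Bool :=
    if b = false then
      if n = 0 then (3, st.2.1, true) else (n, st.2.1, false)
    else (n, st.2.1, st.2.2)
  if st1.1 = 0 then (3, (if st1.2.2 then st1.2.1 + 1 else st1.2.1), true) else st1

-- B's count, recursively over triples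
def pvTriples : List Bool → Int
  | a :: b :: c :: rest => (if a && b && c then 1 else 0) + pvTriples rest
  | _ => 0

lemma pvTriples_cons3 (a b c : Bool) (rest : List Bool) :
    pvTriples (a :: b :: c :: rest) = (if a && b && c then 1 else 0) + pvTriples rest := rfl

lemma getD_cons3 (a b c : Bool) (rest : List Bool) (n : Nat) :
    (a :: b :: c :: rest).getD (n + 3) false = rest.getD n false := rfl

lemma portA_eq_foldl (gen solucion : List Int) :
    adaptacion_3sat gen solucion =
      (List.foldl pvStepA ((3 : Int), (0 : Int), true) (pvMatch gen solucion)).2.1 := by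
  unfold adaptacion_3sat pvMatch
  rw [PySem.List.pyRange_zero_nat, List.foldl_map, List.foldl_map]
  have hf : (fun (st : Int × Int × Bool) (k : Nat) =>
      (fun (st : Int × Int × Bool) (i : Int) =>
        let n := st.1 - 1
        let cont := st.2.1
        let ok := st.2.2
        let st1 : Int × Int × Bool :=
          if PySem.List.pyGetD gen i 0 ≠ PySem.List.pyGetD solucion i 0 then
            if n = 0 then (3, (if false then cont + 1 else cont), true)
            else (n, cont, false)
          else (n, cont, ok)
        if st1.1 = 0 then (3, (if st1.2.2 then st1.2.1 + 1 else st1.2.1), true)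
        else st1) st ((fun k : Nat => (k : Int)) k))
      = (fun st k => pvStepA st ((fun k => gen.getD k 0 == solucion.getD k 0) k)) := by
    funext st k
    simp only [PySem.List.pyGetD_natCast, pvStepA]
    by_cases h : gen.getD k 0 = solucion.getD k 0
    · simp [h]
    · simp [h]
  rw [hf]

lemma scanA_eq (m : List Bool) : ∀ cont : Int,
    (List.foldl pvStepA ((3 : Int), cont, true) m).2.1 = cont + pvTriples m := by
  induction m using pvTriples.induct with
  | case1 a b c rest ih =>
    intro cont
    cases a <;> cases b <;> cases c <;>
      simp [List.foldl, pvStepA, pvTriples_cons3, ih] <;> ring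
  | case2 m h =>
    intro cont
    match m, h with
    | [], _ => simp [pvTriples]
    | [a], _ => cases a <;> simp [List.foldl, pvStepA, pvTriples]
    | [a, b], _ => cases a <;> cases b <;> simp [List.foldl, pvStepA, pvTriples]
    | a :: b :: c :: rest, h => exact absurd rfl (h a b c rest)

lemma count_foldl_eq (m : List Bool) :
    List.foldl
      (fun (cont : Int) (j : Nat) =>
        if m.getD (3 * j) false && m.getD (3 * j + 1) false && m.getD (3 * j + 2) false
        then cont + 1 else cont) 0 (List.range (m.length / 3)) = pvTriples m := by
  induction m using pvTriples.induct with
  | case1 a b c rest ih =>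
    have hlen : (a :: b :: c :: rest).length / 3 = rest.length / 3 + 1 := by
      simp [List.length_cons]; omega
    rw [hlen, List.range_succ_eq_map, List.foldl_cons, List.foldl_map]
    have hstep : (fun (cont : Int) (j : Nat) =>
        if (a :: b :: c :: rest).getD (3 * j.succ) false
            && (a :: b :: c :: rest).getD (3 * j.succ + 1) false
            && (a :: b :: c :: rest).getD (3 * j.succ + 2) false
        then cont + 1 else cont)
      = (fun (cont : Int) (j : Nat) =>
        if rest.getD (3 * j) false && rest.getD (3 * j + 1) false && rest.getD (3 * j + 2) false
        then cont + 1 else cont) := by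
      funext cont j
      rw [show 3 * j.succ + 2 = (3 * j + 2) + 3 from by omega,
          show 3 * j.succ + 1 = (3 * j + 1) + 3 from by omega,
          show 3 * j.succ = (3 * j) + 3 from by omega,
          getD_cons3, getD_cons3, getD_cons3]
    rw [hstep]
    have hinit : (if (a :: b :: c :: rest).getD (3 * 0) false
        && (a :: b :: c :: rest).getD (3 * 0 + 1) false
        && (a :: b :: c :: rest).getD (3 * 0 + 2) false
        then (0 : Int) + 1 else 0) = (if a && b && c then 1 else 0) := by
      simp [List.getD]
    rw [hinit]
    have shift : ∀ (l : List Nat) (init : Int) (f : Nat → Bool),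
        List.foldl (fun (cont : Int) (j : Nat) => if f j then cont + 1 else cont) init l
          = init + List.foldl (fun (cont : Int) (j : Nat) => if f j then cont + 1 else cont) 0 l := by
      intro l
      induction l with
      | nil => intro init f; simp
      | cons x xs ihl =>
        intro init f
        simp only [List.foldl_cons]
        rw [ihl, ihl ((if f x then (0 : Int) + 1 else 0))]
        split <;> ring
    rw [shift (List.range (rest.length / 3)) _
        (fun j => rest.getD (3 * j) false && rest.getD (3 * j + 1) false && rest.getD (3 * j + 2) false),
        ih, pvTriples_cons3]
  | case2 m h =>
    match m, h with
    | [], _ => simp [pvTriples]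
    | [a], _ => simp [pvTriples]
    | [a, b], _ => simp [pvTriples]
    | a :: b :: c :: rest, h => exact absurd rfl (h a b c rest)

lemma portB_eq (gen solucion : List Int) :
    adaptacion_3sat_alt gen solucion = pvTriples (pvMatch gen solucion) := by
  unfold adaptacion_3sat_alt
  have hm : (PySem.List.pyRange 0 (gen.length : Int) 1).map
      (fun i => PySem.List.pyGetD gen i 0 == PySem.List.pyGetD solucion i 0)
      = pvMatch gen solucion := by
    unfold pvMatch
    rw [PySem.List.pyRange_zero_nat, List.map_map]
    apply List.map_congr_left
    intro k _
    simp [PySem.List.pyGetD_natCast]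
  rw [hm]
  have hdiv : PySem.Int.floordiv (gen.length : Int) 3 = ((gen.length / 3 : Nat) : Int) := by
    exact_mod_cast PySem.Int.floordiv_natCast gen.length 3
  rw [hdiv, PySem.List.pyRange_zero_nat, List.foldl_map]
  have hlen : (pvMatch gen solucion).length = gen.length := by
    simp [pvMatch]
  have hf : (fun (cont : Int) (j : Nat) =>
      (fun (cont : Int) (i : Int) =>
        if PySem.List.pyGetD (pvMatch gen solucion) (3 * i) false
            && PySem.List.pyGetD (pvMatch gen solucion) (3 * i + 1) false
            && PySem.List.pyGetD (pvMatch gen solucion) (3 * i + 2) false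
        then cont + 1 else cont) cont ((fun k : Nat => (k : Int)) j))
      = (fun (cont : Int) (j : Nat) =>
        if (pvMatch gen solucion).getD (3 * j) false && (pvMatch gen solucion).getD (3 * j + 1) false
            && (pvMatch gen solucion).getD (3 * j + 2) false
        then cont + 1 else cont) := by
    funext cont j
    beta_reduce
    rw [show (3 : Int) * ((j : Nat) : Int) = ((3 * j : Nat) : Int) from by push_cast; ring,
        show ((3 * j : Nat) : Int) + 1 = ((3 * j + 1 : Nat) : Int) from by push_cast; ring,
        show ((3 * j : Nat) : Int) + 2 = ((3 * j + 2 : Nat) : Int) from by push_cast; ring]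
    simp only [PySem.List.pyGetD_natCast]
  rw [hf, ← hlen, count_foldl_eq]

-- ===== VERDICT (by name: the statement is the Claim_ definition above) =====
theorem adaptacion_3sat_spec : Claim_equal_adaptacion_3sat := by
  intro gen solucion _ _
  unfold Spec_adaptacion_3sat
  rw [portA_eq_foldl, portB_eq, scanA_eq]
  ring
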